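-- pv_equiv track=rewrite | github.com/slifong08/enh_ages | landscape/ENCODE3_cCRE/HepG2/gc_content-all_fantom_enh.py | countgc
-- ===== SOURCE A (Python) =====
-- from collections import Counter
--
-- def countgc(sequence):
--     gc = []
--     total = []
--     letters = ["G", "C", "g", "c"]
--     counts = Counter(sequence)
--
--     for letter in letters:
--         gc.append(int(counts[letter]))
--
--     gc_sum = sum(gc)
--     return gc_sum
-- ===== SOURCE B (Python) =====
-- def countgc(sequence):
--     total = 0
--     for c in sequence:
--         if c in {"G", "C", "g", "c"}:
--             total += 1
--     return total
-- ===== Notes on version B (the rewrite author's own statement) =====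
-- stated objective: simpler
-- what changed: Drops the Counter histogram and the letter-list indexing pass; B keeps a single running count in one direct pass over the sequence characters.
import Mathlib
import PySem

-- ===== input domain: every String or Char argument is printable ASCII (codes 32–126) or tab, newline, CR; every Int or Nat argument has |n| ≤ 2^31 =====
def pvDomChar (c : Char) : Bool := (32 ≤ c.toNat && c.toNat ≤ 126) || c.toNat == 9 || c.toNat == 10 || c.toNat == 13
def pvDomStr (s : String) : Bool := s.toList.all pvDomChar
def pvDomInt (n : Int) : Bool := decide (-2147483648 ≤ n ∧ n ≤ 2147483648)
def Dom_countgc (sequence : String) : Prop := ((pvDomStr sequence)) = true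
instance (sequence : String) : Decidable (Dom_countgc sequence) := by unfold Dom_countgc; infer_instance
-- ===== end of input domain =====

-- B: one direct counting pass over the characters instead of A's Counter histogram plus letter-list pass (simpler).
-- ===== PORT A =====
def countgc (sequence : String) : Int :=
  let gc : List Int := []
  let letters : List Char := ['G', 'C', 'g', 'c']
  let counts : PySem.Dict Char Int := PySem.Dict.counter sequence.toList
  let gc := letters.foldl (fun acc letter => acc ++ [counts.getD letter 0]) gc
  gc.sum

-- ===== PORT B =====
def countgc_alt (sequence : String) : Int :=
  sequence.toList.foldl
    (fun total c => if c ∈ (['G', 'C', 'g', 'c'] : List Char) then total + 1 else total) 0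

-- ===== PRECONDITION & SPEC =====
def Spec_countgc (sequence : String) (out : Int) : Prop := out = countgc_alt sequence
instance (sequence : String) (out : Int) : Decidable (Spec_countgc sequence out) := by unfold Spec_countgc; infer_instance

-- ===== CLAIM (what is proved, stated in full; the proofs are below) =====
def Claim_equal_countgc : Prop := ∀ (sequence : String), Dom_countgc sequence → Spec_countgc sequence (countgc sequence)

-- ===== LEMMAS AND PROOFS =====

-- ===== VERDICT (by name: the statement is the Claim_ definition above) =====
lemma foldl_count (l : List Char) (acc : Int) :
    l.foldl (fun total c => if c ∈ (['G', 'C', 'g', 'c'] : List Char) then total + 1 else total) acc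
      = acc + l.countP (fun c => decide (c ∈ (['G', 'C', 'g', 'c'] : List Char))) := by
  induction l generalizing acc with
  | nil => simp
  | cons h t ih =>
    simp only [List.foldl_cons, List.countP_cons]
    by_cases hp : h ∈ (['G', 'C', 'g', 'c'] : List Char)
    · rw [if_pos hp, ih]
      simp [hp]
      push_cast
      ring
    · rw [if_neg hp, ih]
      simp [hp]

lemma countP_split (l : List Char) :
    (l.countP (fun c => decide (c ∈ (['G', 'C', 'g', 'c'] : List Char))) : Int)
      = l.count 'G' + l.count 'C' + l.count 'g' + l.count 'c' := by
  induction l with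
  | nil => simp
  | cons h t ih =>
    by_cases h1 : h = 'G' <;> by_cases h2 : h = 'C' <;> by_cases h3 : h = 'g' <;>
      by_cases h4 : h = 'c' <;>
      simp_all [List.countP_cons, List.count_cons] <;> push_cast <;> omega

theorem countgc_spec : Claim_equal_countgc := by
  intro s _
  unfold Spec_countgc countgc countgc_alt
  rw [foldl_count, countP_split]
  simp only [List.foldl, PySem.Dict.getD_counter, List.sum_cons, List.sum_nil,
    List.nil_append, List.cons_append]
  ring
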